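-- pv_equiv track=rewrite | github.com/pypi-data/pypi-mirror-373 | packages/erbsland-conf/erbsland_conf-0.9.8.tar.gz/erbsland_conf-0.9.8/src/erbsland/conf/impl/text_escape.py | escape_text_for_test
-- ===== SOURCE A (Python) =====
-- def escape_text_for_test(text: str) -> str:
--     """Escape ``text`` using the strict rules employed by unit tests."""
--
--     result: list[str] = []
--     for ch in text:
--         cp = ord(ch)
--         if cp <= 0x1F or cp >= 0x7F or ch in ["\\", '"', ".", ":", "="]:
--             result.append(f"\\u{{{cp:x}}}")
--         else:
--             result.append(ch)
--     return "".join(result)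
-- ===== SOURCE B (Python) =====
-- def _needs_escape(ch: str) -> bool:
--     cp = ord(ch)
--     return cp <= 0x1F or cp >= 0x7F or ch in '\\".:='
--
--
-- def escape_text_for_test(text: str) -> str:
--     """Escape ``text`` using the strict rules employed by unit tests.
--
--     Run-based scan: copy each maximal run of safe characters as one whole
--     slice, escape only the single boundary character, and continue.
--     """
--     parts: list[str] = []
--     i, n = 0, len(text)
--     while i < n:
--         j = i
--         while j < n and not _needs_escape(text[j]):
--             j += 1
--         parts.append(text[i:j])
--         if j < n:
--             parts.append(f"\\u{{{ord(text[j]):x}}}")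
--             j += 1
--         i = j
--     return "".join(parts)
-- ===== Notes on version B (the rewrite author's own statement) =====
-- stated objective: alternative
-- what changed: Replaces A's per-character loop (append each char or escape one by one) with a two-pointer run-based scan that emits each maximal run of safe characters as a single slice and escapes only the boundary character.
import Mathlib
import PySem

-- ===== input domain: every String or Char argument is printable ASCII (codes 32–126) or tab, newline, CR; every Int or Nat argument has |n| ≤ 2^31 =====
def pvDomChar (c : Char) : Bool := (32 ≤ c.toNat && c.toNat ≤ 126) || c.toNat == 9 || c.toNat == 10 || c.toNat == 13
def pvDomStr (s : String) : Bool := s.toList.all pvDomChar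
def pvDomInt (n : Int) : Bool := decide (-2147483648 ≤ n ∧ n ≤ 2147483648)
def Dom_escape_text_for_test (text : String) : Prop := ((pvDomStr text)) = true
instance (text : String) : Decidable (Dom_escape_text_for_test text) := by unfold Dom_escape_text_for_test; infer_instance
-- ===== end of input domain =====

-- B replaces A's per-character loop by a two-pointer run-based scan (copy maximal safe runs whole, escape only boundary chars); same cost, different decomposition.

-- ===== PORT A =====
-- f"{cp:x}": lowercase unpadded hex of a nonnegative codepoint (exact for cp ≥ 0)
def pvHexDigit (n : Nat) : Char := if n < 10 then Char.ofNat (48 + n) else Char.ofNat (87 + n)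
def pvHex (n : Nat) : List Char :=
  if _h : n < 16 then [pvHexDigit n] else pvHex (n / 16) ++ [pvHexDigit (n % 16)]

def escape_text_for_test (text : String) : String :=
  -- result: list[str]; for ch in text: append escape or ch; "".join(result)
  let result : List (List Char) :=
    text.toList.foldl (fun acc ch =>
      let cp := ch.toNat
      if cp ≤ 0x1F ∨ cp ≥ 0x7F ∨ ch ∈ ['\\', '"', '.', ':', '='] then
        acc ++ [('\\' :: 'u' :: '{' :: pvHex cp) ++ ['}']]
      else
        acc ++ [[ch]]) []
  String.ofList result.flatten

-- ===== PORT B =====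
-- _needs_escape(ch)
def pvNeedsEscape (ch : Char) : Bool :=
  ch.toNat ≤ 0x1F || 0x7F ≤ ch.toNat || ch == '\\' || ch == '"' || ch == '.' || ch == ':' || ch == '='

-- B's outer while loop over the remaining suffix: the inner `while j < n and not
-- _needs_escape(text[j]): j += 1` followed by the slice text[i:j] is exactly
-- takeWhile/dropWhile of the safe predicate on the remaining characters.
def pvEscRuns (cs : List Char) : List Char :=
  let run := cs.takeWhile (fun c => !pvNeedsEscape c)
  match h : cs.dropWhile (fun c => !pvNeedsEscape c) with
  | [] => run
  | c :: tl => run ++ (('\\' :: 'u' :: '{' :: pvHex c.toNat) ++ ['}']) ++ pvEscRuns tl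
termination_by cs.length
decreasing_by
  have hle : (cs.dropWhile (fun c => !pvNeedsEscape c)).length ≤ cs.length :=
    List.length_dropWhile_le _ _
  rw [h] at hle
  simp at hle
  omega

def escape_text_for_test_alt (text : String) : String :=
  String.ofList (pvEscRuns text.toList)

-- ===== PRECONDITION & SPEC =====
def Spec_escape_text_for_test (text : String) (out : String) : Prop := out = escape_text_for_test_alt text
instance (text : String) (out : String) : Decidable (Spec_escape_text_for_test text out) := by unfold Spec_escape_text_for_test; infer_instance

-- ===== CLAIM (what is proved, stated in full; the proofs are below) =====
def Claim_equal_escape_text_for_test : Prop := ∀ (text : String), Dom_escape_text_for_test text → Spec_escape_text_for_test text (escape_text_for_test text)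

-- ===== LEMMAS AND PROOFS =====
-- common per-char denominator both programs are reduced to
def pvEsc1 (ch : Char) : List Char :=
  if pvNeedsEscape ch then ('\\' :: 'u' :: '{' :: pvHex ch.toNat) ++ ['}'] else [ch]

theorem pv_cond_iff (ch : Char) :
    pvNeedsEscape ch = true ↔
      (ch.toNat ≤ 0x1F ∨ ch.toNat ≥ 0x7F ∨ ch ∈ ['\\', '"', '.', ':', '=']) := by
  simp [pvNeedsEscape, List.mem_cons, or_assoc, ge_iff_le]

theorem pv_loopA (l : List Char) (acc : List (List Char)) :
    (l.foldl (fun acc ch =>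
        let cp := ch.toNat
        if cp ≤ 0x1F ∨ cp ≥ 0x7F ∨ ch ∈ ['\\', '"', '.', ':', '='] then
          acc ++ [('\\' :: 'u' :: '{' :: pvHex cp) ++ ['}']]
        else acc ++ [[ch]]) acc).flatten
      = acc.flatten ++ l.flatMap pvEsc1 := by
  induction l generalizing acc with
  | nil => simp
  | cons ch tl ih =>
    simp only [List.foldl_cons, List.flatMap_cons]
    rw [ih]
    by_cases h : ch.toNat ≤ 0x1F ∨ ch.toNat ≥ 0x7F ∨ ch ∈ ['\\', '"', '.', ':', '=']
    · rw [if_pos (by simpa using h)]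
      simp [pvEsc1, if_pos ((pv_cond_iff ch).mpr h)]
    · rw [if_neg (by simpa using h)]
      simp [pvEsc1, if_neg (fun hb => h ((pv_cond_iff ch).mp hb))]

theorem pv_dropWhile_head {p : Char → Bool} {cs : List Char} {c : Char} {tl : List Char}
    (h : cs.dropWhile p = c :: tl) : p c = false := by
  induction cs with
  | nil => simp [List.dropWhile] at h
  | cons a as ih =>
    by_cases hp : p a
    · exact ih (by simpa [List.dropWhile, hp] using h)
    · rw [List.dropWhile_cons_of_neg (by simpa using hp)] at h
      cases h
      simpa using hp

theorem pv_flatMap_safe (l : List Char) (hl : ∀ c ∈ l, pvNeedsEscape c = false) :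
    l.flatMap pvEsc1 = l := by
  induction l with
  | nil => rfl
  | cons a as ih =>
    simp only [List.flatMap_cons]
    rw [ih (fun c hc => hl c (List.mem_cons_of_mem _ hc))]
    simp [pvEsc1, hl a (List.mem_cons_self)]

theorem pv_runs_eq (cs : List Char) : pvEscRuns cs = cs.flatMap pvEsc1 := by
  have hsafe : ∀ (l : List Char), ∀ c ∈ l.takeWhile (fun c => !pvNeedsEscape c),
      pvNeedsEscape c = false := by
    intro l c hc
    have := List.mem_takeWhile_imp hc
    simpa using this
  induction cs using pvEscRuns.induct with
  | case1 cs h =>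
    rw [pvEscRuns]
    split
    next =>
      have hcs : cs = cs.takeWhile (fun c => !pvNeedsEscape c) := by
        have := (List.takeWhile_append_dropWhile (p := fun c => !pvNeedsEscape c) (l := cs))
        rw [h] at this; simpa using this.symm
      calc cs.takeWhile (fun c => !pvNeedsEscape c)
          = (cs.takeWhile (fun c => !pvNeedsEscape c)).flatMap pvEsc1 :=
            (pv_flatMap_safe _ (hsafe cs)).symm
        _ = cs.flatMap pvEsc1 := by rw [← hcs]
    next c tl heq =>
      rw [h] at heq; exact absurd heq (by simp)
  | case2 cs c tl h ih =>
    rw [pvEscRuns]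
    split
    next heq =>
      rw [h] at heq; exact absurd heq (by simp)
    next c' tl' heq =>
      rw [h] at heq
      injection heq with hc htl
      subst hc; subst htl
      rw [ih]
      have hcs : cs = cs.takeWhile (fun c => !pvNeedsEscape c) ++ c :: tl := by
        have := (List.takeWhile_append_dropWhile (p := fun c => !pvNeedsEscape c) (l := cs))
        rw [h] at this; exact this.symm
      conv_rhs => rw [hcs]
      rw [List.flatMap_append, List.flatMap_cons, pv_flatMap_safe _ (hsafe cs)]
      have hc : pvNeedsEscape c = true := by
        have := pv_dropWhile_head h; simpa using this
      simp [pvEsc1, hc]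

-- ===== VERDICT (by name: the statement is the Claim_ definition above) =====
theorem escape_text_for_test_spec : Claim_equal_escape_text_for_test := by
  intro text _
  show _ = _
  simp only [escape_text_for_test, escape_text_for_test_alt]
  rw [pv_runs_eq]
  exact congrArg String.ofList (by simpa using pv_loopA text.toList [])
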